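-- pv_equiv track=rewrite | github.com/mraa022/Tic-Tac-Toe-API | control.py | hash_board_r
-- ===== SOURCE A (Python) =====
-- def hash_board_r(board_matrix):
--     total = 0
--     k = 0
--     r = len(board_matrix[0])
--     for i in range(r):
--         for j in range(r):
--             total+= (r**k)*board_matrix[i][j]
--             k+=1
--     return str(int(total))
-- ===== SOURCE B (Python) =====
-- def hash_board_r(board_matrix):
--     r = len(board_matrix[0])
--     total = 0
--     for row in reversed(board_matrix[:r]):
--         for cell in reversed(row[:r]):
--             total = total * r + cell
--     return str(total)
-- ===== Notes on version B (the rewrite author's own statement) =====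
-- stated objective: faster
-- what changed: Replaces the index-driven nested range loops with r**k exponentiation per cell by a slice-and-reverse nested Horner pass over the rows themselves (process rows and cells back-to-front, total = total*r + cell), so no power and no indexing is ever computed.
import Mathlib
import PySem

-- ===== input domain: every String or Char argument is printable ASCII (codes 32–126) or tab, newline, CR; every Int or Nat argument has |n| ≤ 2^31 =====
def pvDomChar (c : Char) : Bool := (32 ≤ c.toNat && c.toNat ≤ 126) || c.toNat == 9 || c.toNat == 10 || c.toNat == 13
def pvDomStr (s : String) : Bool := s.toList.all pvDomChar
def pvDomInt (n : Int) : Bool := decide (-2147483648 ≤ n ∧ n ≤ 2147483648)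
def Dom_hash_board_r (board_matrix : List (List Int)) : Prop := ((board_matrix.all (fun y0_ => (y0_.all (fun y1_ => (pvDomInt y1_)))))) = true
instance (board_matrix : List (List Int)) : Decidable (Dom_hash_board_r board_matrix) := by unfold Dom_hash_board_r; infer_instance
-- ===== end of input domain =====

-- B computes the same base-r positional hash by a nested Horner pass over the sliced rows
-- traversed back-to-front, avoiding the r**k powers and the index arithmetic A uses (objective: faster, constant-factor).

-- ===== PORT A =====
-- literal port of A: nested loops over range(r), state (total, k), total += r**k * board[i][j]
def hash_board_r (board_matrix : List (List Int)) : String :=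
  let r : Int := (PySem.List.pyGetD board_matrix 0 []).length
  let st :=
    (PySem.List.pyRange 0 r 1).foldl (fun (s : Int × Int) i =>
      (PySem.List.pyRange 0 r 1).foldl (fun (s : Int × Int) j =>
        (s.1 + r ^ s.2.toNat * PySem.List.pyGetD (PySem.List.pyGetD board_matrix i []) j 0,
         s.2 + 1)) s) (0, 0)
  PySem.Int.toStr st.1

-- ===== PORT B =====
-- literal port of B: for row in reversed(board_matrix[:r]): for cell in reversed(row[:r]): total = total*r + cell
def hash_board_r_alt (board_matrix : List (List Int)) : String :=
  let r : Int := (PySem.List.pyGetD board_matrix 0 []).length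
  let total :=
    (PySem.List.slice board_matrix none (some r)).reverse.foldl (fun t row =>
      (PySem.List.slice row none (some r)).reverse.foldl (fun t cell => t * r + cell) t) 0
  PySem.Int.toStr total

-- ===== PRECONDITION & SPEC =====
-- Pre_ excludes exactly the inputs where the Python A raises IndexError: the empty matrix
-- (board_matrix[0]) and matrices with fewer than r rows or a row shorter than r among the
-- first r rows (r = len of first row).
def Pre_hash_board_r (board_matrix : List (List Int)) : Prop :=
  board_matrix ≠ [] ∧
  (board_matrix.headD []).length ≤ board_matrix.length ∧
  ∀ row ∈ board_matrix.take (board_matrix.headD []).length,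
    (board_matrix.headD []).length ≤ row.length
instance (board_matrix : List (List Int)) : Decidable (Pre_hash_board_r board_matrix) := by
  unfold Pre_hash_board_r; infer_instance
def pvWitness_hash_board_r : List (List Int) := [[1, 2], [0, 1]]

def Spec_hash_board_r (board_matrix : List (List Int)) (out : String) : Prop := out = hash_board_r_alt board_matrix
instance (board_matrix : List (List Int)) (out : String) : Decidable (Spec_hash_board_r board_matrix out) := by unfold Spec_hash_board_r; infer_instance

-- ===== CLAIM (what is proved, stated in full; the proofs are below) =====
def Claim_equal_hash_board_r : Prop := ∀ (board_matrix : List (List Int)), Dom_hash_board_r board_matrix → Pre_hash_board_r board_matrix → Spec_hash_board_r board_matrix (hash_board_r board_matrix)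

-- ===== LEMMAS AND PROOFS =====

-- value of the base-r polynomial with coefficient list L (least-significant first)
def pvPoly (r : Int) : List Int → Int
  | [] => 0
  | c :: cs => c + r * pvPoly r cs

-- Horner's rule over the reversed list computes pvPoly
theorem pvHorner (r : Int) (L : List Int) :
    L.reverse.foldl (fun t c => t * r + c) 0 = pvPoly r L := by
  rw [List.foldl_reverse]
  induction L with
  | nil => simp [pvPoly]
  | cons c cs ih => simp [pvPoly, ih]; ring

-- A's accumulating fold over a coefficient list computes pvPoly (shifted by r^k)
theorem pvAfold (r : Int) (L : List Int) : ∀ (t k : Int), 0 ≤ k →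
    (L.foldl (fun (s : Int × Int) c => (s.1 + r ^ s.2.toNat * c, s.2 + 1)) (t, k)).1
      = t + r ^ k.toNat * pvPoly r L := by
  induction L with
  | nil => intro t k _; simp [pvPoly]
  | cons c cs ih =>
      intro t k hk
      have h1 : (k + 1).toNat = k.toNat + 1 := by omega
      simp only [List.foldl_cons]
      rw [ih (t + r ^ k.toNat * c) (k + 1) (by omega), h1, pvPoly, pow_succ]
      ring

-- a nested foldl over an outer list is a foldl over the flatMap
theorem pvFoldlFlatMap {α β σ : Type} (l : List α) (g : α → List β) (f : σ → β → σ) :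
    ∀ (s : σ), (l.flatMap g).foldl f s = l.foldl (fun s i => (g i).foldl f s) s := by
  induction l with
  | nil => intro s; simp
  | cons i is ih => intro s; simp [List.foldl_append, ih]

-- B's nested reversed fold is the plain Horner fold over the reversed flattening
theorem pvNested (r : Int) (RS : List (List Int)) : ∀ (t : Int),
    RS.reverse.foldl (fun t row => row.reverse.foldl (fun t c => t * r + c) t) t
      = (RS.flatMap id).reverse.foldl (fun t c => t * r + c) t := by
  induction RS with
  | nil => intro t; simp
  | cons row rs ih =>
      intro t
      simp only [List.reverse_cons, List.flatMap_cons, List.reverse_append,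
        List.foldl_append, id]
      rw [ih t]; simp

-- the first n elements, read off by index
theorem pvTakeEqMapRange {α : Type} (xs : List α) (d : α) (n : ℕ) (h : n ≤ xs.length) :
    (List.range n).map (fun i => xs.getD i d) = xs.take n := by
  apply List.ext_getElem
  · simp; omega
  · intro i h1 h2
    simp only [List.getElem_map, List.getElem_range, List.getElem_take]
    rw [List.getD_eq_getElem xs d (by simp at h1; omega)]

-- row k of the matrix is a member of the first-n prefix
theorem pvGetDMemTake (bm : List (List Int)) (n k : ℕ) (hk : k < n) (h1 : n ≤ bm.length) :
    bm.getD k [] ∈ bm.take n := by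
  rw [List.getD_eq_getElem bm [] (by omega)]
  have : (bm.take n)[k]'(by simp; omega) = bm[k]'(by omega) := List.getElem_take
  rw [← this]; exact List.getElem_mem _

-- the index-driven cell list of A equals the slice-driven cell list of B
theorem pvCells (bm : List (List Int)) (n : ℕ) (h1 : n ≤ bm.length)
    (h2 : ∀ row ∈ bm.take n, n ≤ row.length) :
    (List.range n).flatMap (fun k => (List.range n).map (fun j => ((bm.getD k []).getD j 0)))
      = (bm.take n).flatMap (fun row => row.take n) := by
  conv_rhs => rw [← pvTakeEqMapRange bm [] n h1, List.flatMap_map]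
  simp only [List.flatMap_def]
  apply congrArg
  apply List.map_congr_left
  intro k hk
  exact pvTakeEqMapRange (bm.getD k []) 0 n (h2 _ (pvGetDMemTake bm n k (List.mem_range.mp hk) h1))

-- ===== VERDICT (by name: the statement is the Claim_ definition above) =====
theorem hash_board_r_spec : Claim_equal_hash_board_r := by
  intro bm _ hpre
  obtain ⟨hne, hrows, hcells⟩ := hpre
  obtain ⟨row0, rest, rfl⟩ : ∃ r0 rs, bm = r0 :: rs := by
    cases bm with
    | nil => exact absurd rfl hne
    | cons a l => exact ⟨a, l, rfl⟩
  simp only [List.headD_cons] at hrows hcells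
  have hhead : PySem.List.pyGetD (row0 :: rest) 0 [] = row0 := by
    simp [PySem.List.pyGetD_zero]
  simp only [Spec_hash_board_r, hash_board_r, hash_board_r_alt, hhead]
  set bm : List (List Int) := row0 :: rest with hbm
  set n : ℕ := row0.length with hn
  congr 1
  -- A's side: fold over the flatMap of the index-driven cell list, then pvPoly
  calc ((PySem.List.pyRange 0 (n : Int) 1).foldl (fun (s : Int × Int) i =>
          (PySem.List.pyRange 0 (n : Int) 1).foldl (fun (s : Int × Int) j =>
            (s.1 + (n : Int) ^ s.2.toNat * PySem.List.pyGetD (PySem.List.pyGetD bm i []) j 0,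
             s.2 + 1)) s) (0, 0)).1
      = (((PySem.List.pyRange 0 (n : Int) 1).flatMap (fun i =>
            (PySem.List.pyRange 0 (n : Int) 1).map (fun j =>
              PySem.List.pyGetD (PySem.List.pyGetD bm i []) j 0))).foldl
            (fun (s : Int × Int) c => (s.1 + (n : Int) ^ s.2.toNat * c, s.2 + 1)) (0, 0)).1 := by
        rw [pvFoldlFlatMap]; simp only [List.foldl_map]
    _ = pvPoly (n : Int) ((List.range n).flatMap (fun k =>
            (List.range n).map (fun j => ((bm.getD k []).getD j 0)))) := by
        rw [pvAfold _ _ 0 0 le_rfl]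
        simp [PySem.List.pyRange_one, List.flatMap_map, List.map_map, Function.comp_def,
          PySem.List.pyGetD_natCast, List.getD]
    _ = pvPoly (n : Int) ((bm.take n).flatMap (fun row => row.take n)) := by
        rw [pvCells bm n hrows hcells]
    _ = ((bm.take n).flatMap (fun row => row.take n)).reverse.foldl
          (fun t c => t * (n : Int) + c) 0 := (pvHorner _ _).symm
    _ = ((bm.take n).map (fun row => row.take n)).reverse.foldl
          (fun t row => row.reverse.foldl (fun t c => t * (n : Int) + c) t) 0 := by
        rw [pvNested]
        simp [List.flatMap_def, -List.map_take]
    _ = (PySem.List.slice bm none (some (n : Int))).reverse.foldl (fun t row =>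
          (PySem.List.slice row none (some (n : Int))).reverse.foldl
            (fun t cell => t * (n : Int) + cell) t) 0 := by
        simp only [PySem.List.slice_to_natCast, ← List.map_reverse, List.foldl_map]
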